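-- pv_equiv track=rewrite | github.com/guojianryan/IGCSE_CS | codewars/game_of_life.py | remove_zero_padding_by_rows
-- ===== SOURCE A (Python) =====
-- def remove_zero_padding_by_rows(cells):
--     zeros = set([0] * len(cells[0]))
--
--     index = len(cells) - 1
--     while index >= 0:
--         if len(set(cells[index]) - zeros) == 0:
--             del cells[index]
--             index -= 1
--         else:
--             break
--
--     index = 0
--     while index < len(cells) - 1:
--         if len(set(cells[index]) - zeros) == 0:
--             del cells[index]
--         else:
--             break
--
--     return cells
-- ===== SOURCE B (Python) =====
-- def remove_zero_padding_by_rows(cells):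
--     zeros = set([0] * len(cells[0]))
--     nz = [i for i, row in enumerate(cells) if set(row) - zeros]
--     if nz:
--         del cells[nz[-1] + 1:]
--         del cells[:nz[0]]
--     else:
--         del cells[:]
--     return cells
-- ===== Notes on version B (the rewrite author's own statement) =====
-- stated objective: simpler
-- what changed: Replaces A's two end-stripping while loops that repeatedly delete single rows with one enumerate pass collecting the indices of non-zero rows followed by two slice deletions.
-- outside the precondition, e.g. on remove_zero_padding_by_rows([]): A raises IndexError, B raises IndexError
import Mathlib
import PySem

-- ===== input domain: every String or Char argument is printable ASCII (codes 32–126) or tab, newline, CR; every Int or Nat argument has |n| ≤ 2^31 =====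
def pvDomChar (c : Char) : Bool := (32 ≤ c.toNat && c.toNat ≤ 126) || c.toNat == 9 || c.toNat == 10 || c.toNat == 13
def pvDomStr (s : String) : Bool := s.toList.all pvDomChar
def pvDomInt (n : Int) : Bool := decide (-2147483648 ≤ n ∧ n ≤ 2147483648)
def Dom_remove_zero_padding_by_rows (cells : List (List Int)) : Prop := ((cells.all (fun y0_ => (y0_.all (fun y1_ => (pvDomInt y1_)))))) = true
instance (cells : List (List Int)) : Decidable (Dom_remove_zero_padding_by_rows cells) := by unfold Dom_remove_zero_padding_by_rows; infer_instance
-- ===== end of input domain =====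

-- B replaces A's two end-stripping while loops (which repeatedly delete single rows)
-- with one enumerate pass collecting the non-zero row indices plus two slice deletions;
-- both A and B mutate `cells` in place (same net mutation); the theorems are about the
-- return value.

-- ===== PORT A =====
-- first while loop: delete trailing rows whose set difference with `zeros` is empty
def stripBackA (z : List Int → Bool) : List (List Int) → List (List Int)
  | [] => []
  | x :: xs =>
      if z ((x :: xs).getLast (by simp)) then stripBackA z (x :: xs).dropLast
      else x :: xs
termination_by l => l.length
decreasing_by simp

-- second while loop: `del cells[0]` while index 0 < len(cells) - 1 and row is padding
def stripFrontA (z : List Int → Bool) : List (List Int) → List (List Int)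
  | [] => []
  | [x] => [x]
  | x :: y :: xs => if z x then stripFrontA z (y :: xs) else x :: y :: xs

def remove_zero_padding_by_rows (cells : List (List Int)) : List (List Int) :=
  match PySem.List.pyGet? cells 0 with
  | none => []   -- cells[0] raises IndexError; excluded by Pre_
  | some r0 =>
      -- zeros = set([0]*len(cells[0])); len(set(row) - zeros) == 0
      -- ⟺ if zeros = {} then row has no elements, else every element of row is 0
      let pad : List Int → Bool := fun row =>
        if r0.length = 0 then row.isEmpty else row.all (· == 0)
      stripFrontA pad (stripBackA pad cells)

-- ===== PORT B =====
def remove_zero_padding_by_rows_alt (cells : List (List Int)) : List (List Int) :=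
  match PySem.List.pyGet? cells 0 with
  | none => []   -- cells[0] raises IndexError; excluded by Pre_
  | some r0 =>
      -- set(row) - zeros is truthy ⟺ some element of row lies outside zeros
      let keep : List Int → Bool := fun row =>
        if r0.length = 0 then !row.isEmpty else row.any (· != 0)
      -- nz = [i for i, row in enumerate(cells) if set(row) - zeros]
      let nz : List Int :=
        ((PySem.List.enumerate cells).filter (fun p => keep p.2)).map (·.1)
      match nz with
      | [] => []                              -- del cells[:]
      | i :: rest =>
          -- del cells[nz[-1]+1:]; del cells[:nz[0]]
          PySem.List.slice
            (PySem.List.slice cells none (some ((i :: rest).getLast (by simp) + 1)))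
            (some i) none

-- ===== PRECONDITION & SPEC =====
-- Pre_ excludes only the empty grid, on which Python A raises IndexError at cells[0]
-- (B raises the same there).
def Pre_remove_zero_padding_by_rows (cells : List (List Int)) : Prop := cells ≠ []
instance (cells : List (List Int)) : Decidable (Pre_remove_zero_padding_by_rows cells) := by unfold Pre_remove_zero_padding_by_rows; infer_instance
def pvWitness_remove_zero_padding_by_rows : List (List Int) := [[0, 0], [1, 2], [0, 0]]

def Spec_remove_zero_padding_by_rows (cells : List (List Int)) (out : List (List Int)) : Prop := out = remove_zero_padding_by_rows_alt cells
instance (cells : List (List Int)) (out : List (List Int)) : Decidable (Spec_remove_zero_padding_by_rows cells out) := by unfold Spec_remove_zero_padding_by_rows; infer_instance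

-- ===== CLAIM (what is proved, stated in full; the proofs are below) =====
def Claim_equal_remove_zero_padding_by_rows : Prop := ∀ (cells : List (List Int)), Dom_remove_zero_padding_by_rows cells → Pre_remove_zero_padding_by_rows cells → Spec_remove_zero_padding_by_rows cells (remove_zero_padding_by_rows cells)

-- ===== LEMMAS AND PROOFS =====

-- the non-zero index list of B, with starting offset, for a fixed padding predicate
def nzIdx (pad : List Int → Bool) (l : List (List Int)) (s : Int) : List Int :=
  ((PySem.List.enumerate l s).filter (fun p => !pad p.2)).map (·.1)

theorem nzIdx_nil (pad : List Int → Bool) (s : Int) : nzIdx pad [] s = [] := by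
  simp [nzIdx, PySem.List.enumerate_nil]

theorem nzIdx_cons (pad : List Int → Bool) (x : List Int) (xs : List (List Int)) (s : Int) :
    nzIdx pad (x :: xs) s =
      (if pad x then [] else [s]) ++ nzIdx pad xs (s + 1) := by
  simp [nzIdx, PySem.List.enumerate_cons, List.filter_cons]
  by_cases h : pad x <;> simp [h]

theorem nzIdx_append_singleton (pad : List Int → Bool) (ys : List (List Int)) (y : List Int) (s : Int) :
    nzIdx pad (ys ++ [y]) s =
      nzIdx pad ys s ++ (if pad y then [] else [s + ys.length]) := by
  simp [nzIdx, PySem.List.enumerate_append, PySem.List.enumerate_cons,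
    List.filter_append, List.filter_cons]
  by_cases h : pad y <;> simp [h]

theorem mem_nzIdx (pad : List Int → Bool) (l : List (List Int)) (s : Int) (i : Int)
    (h : i ∈ nzIdx pad l s) : ∃ k : Nat, k < l.length ∧ i = s + k := by
  simp only [nzIdx, List.mem_map] at h
  obtain ⟨p, hp, rfl⟩ := h
  have hp' := List.mem_of_mem_filter hp
  rw [PySem.List.mem_enumerate_iff] at hp'
  obtain ⟨k, hk, rfl⟩ := hp'
  exact ⟨k, hk, rfl⟩

-- head of nz is the first non-padding index: dropping to it equals dropWhile pad
theorem drop_head_nzIdx (pad : List Int → Bool) :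
    ∀ (l : List (List Int)) (s : Nat) (i : Int) (rest : List Int),
      nzIdx pad l s = i :: rest →
      (s : Int) ≤ i ∧ l.drop (i - s).toNat = l.dropWhile pad := by
  intro l
  induction l with
  | nil => intro s i rest h; simp [nzIdx_nil] at h
  | cons x xs ih =>
      intro s i rest h
      rw [nzIdx_cons] at h
      by_cases hx : pad x
      · simp [hx] at h
        have h' : nzIdx pad xs ((s + 1 : Nat) : Int) = i :: rest := by
          push_cast; exact_mod_cast h
        obtain ⟨hle, hdrop⟩ := ih (s + 1) i rest h'
        constructor
        · push_cast at hle ⊢; omega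
        · have : (i - s).toNat = (i - (s + 1 : Nat)).toNat + 1 := by
            push_cast at hle ⊢; omega
          rw [this, List.drop_succ_cons, List.dropWhile_cons_of_pos (by simp [hx]), hdrop]
      · simp [hx] at h
        obtain ⟨rfl, -⟩ := h
        refine ⟨le_refl _, ?_⟩
        simp [hx]

-- A's backward while loop equals reverse-dropWhile-reverse
theorem getLast_of_getLast? {α : Type} (l : List α) (h : l ≠ []) (y : α)
    (hy : l.getLast? = some y) : l.getLast h = y := by
  rw [List.getLast?_eq_some_getLast h] at hy; exact Option.some_inj.mp hy

theorem stripBackA_concat (z : List Int → Bool) (ys : List (List Int)) (y : List Int) :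
    stripBackA z (ys ++ [y]) = if z y then stripBackA z ys else ys ++ [y] := by
  cases h : ys ++ [y] with
  | nil => simp at h
  | cons a as =>
      rw [stripBackA]
      have h1 : (a :: as).getLast (by simp) = y :=
        getLast_of_getLast? _ (by simp) y (by rw [← h]; exact List.getLast?_concat)
      have h2 : (a :: as).dropLast = ys := by
        rw [← h]; exact List.dropLast_concat
      rw [h1, h2]

-- A's forward while loop equals dropWhile when the last row is not padding
theorem stripFrontA_eq_dropWhile (z : List Int → Bool) :
    ∀ (l : List (List Int)), (∀ y, l.getLast? = some y → z y = false) →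
      stripFrontA z l = l.dropWhile z := by
  intro l
  induction l with
  | nil => intro _; simp [stripFrontA]
  | cons x t ih =>
      intro hlast
      cases t with
      | nil =>
          have hx : z x = false := hlast x (by simp)
          simp [stripFrontA, hx]
      | cons y xs =>
          by_cases hx : z x
          · rw [stripFrontA, if_pos hx, List.dropWhile_cons_of_pos (by simp [hx])]
            exact ih (by intro a ha; exact hlast a (by simpa using ha))
          · rw [stripFrontA, if_neg hx]
            simp [hx]

-- B's set-difference truthiness equals the negation of A's padding test
theorem any_ne_eq_not_all (row : List Int) :
    (row.any (· != 0)) = !(row.all (· == 0)) := by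
  induction row with
  | nil => rfl
  | cons a t ih =>
      simp only [List.any_cons, List.all_cons, Bool.not_and, ih]; rfl

-- core equivalence for a fixed padding predicate
theorem core_eq (pad : List Int → Bool) (l : List (List Int)) :
    (match nzIdx pad l 0 with
     | [] => ([] : List (List Int))
     | i :: rest =>
         PySem.List.slice
           (PySem.List.slice l none (some ((i :: rest).getLast (by simp) + 1)))
           (some i) none) =
    stripFrontA pad (stripBackA pad l) := by
  induction l using List.reverseRecOn with
  | nil => simp [nzIdx_nil, stripBackA, stripFrontA]
  | append_singleton ys y ih =>
      by_cases hy : pad y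
      · -- last row is padding: both sides reduce to the ys case
        rw [stripBackA_concat, if_pos hy]
        rw [show nzIdx pad (ys ++ [y]) 0 = nzIdx pad ys 0 by
          rw [nzIdx_append_singleton]; simp [hy]]
        rw [← ih]
        cases h : nzIdx pad ys 0 with
        | nil => rfl
        | cons i rest =>
            have hj : (i :: rest).getLast (by simp) ∈ nzIdx pad ys 0 := by
              rw [h]; exact List.getLast_mem _
            obtain ⟨k, hk, hjk⟩ := mem_nzIdx pad ys 0 _ hj
            -- the outer slice takes at most ys.length rows, so the appended y is irrelevant
            have h1 : PySem.List.slice (ys ++ [y]) none (some ((i :: rest).getLast (by simp) + 1)) =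
                PySem.List.slice ys none (some ((i :: rest).getLast (by simp) + 1)) := by
              rw [hjk]
              have : (0 : Int) + k + 1 = ((k + 1 : Nat) : Int) := by push_cast; ring
              rw [this, PySem.List.slice_to_natCast, PySem.List.slice_to_natCast]
              exact List.take_append_of_le_length (by omega)
            show PySem.List.slice
                (PySem.List.slice (ys ++ [y]) none (some ((i :: rest).getLast (by simp) + 1)))
                (some i) none =
              PySem.List.slice
                (PySem.List.slice ys none (some ((i :: rest).getLast (by simp) + 1)))
                (some i) none
            rw [h1]
      · -- last row is non-zero: back strip stops immediately
        rw [stripBackA_concat, if_neg hy]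
        rw [stripFrontA_eq_dropWhile pad (ys ++ [y])
          (by intro a ha; simp at ha; subst ha; exact eq_false_of_ne_true (by simp [hy]))]
        have hnz : nzIdx pad (ys ++ [y]) 0 = nzIdx pad ys 0 ++ [(ys.length : Int)] := by
          rw [nzIdx_append_singleton]; simp [hy]
        cases h : nzIdx pad (ys ++ [y]) 0 with
        | nil => rw [h] at hnz; simp at hnz
        | cons i rest =>
            have hlast : (i :: rest).getLast (by simp) = (ys.length : Int) :=
              getLast_of_getLast? _ (by simp) _
                (by rw [← h, hnz]; exact List.getLast?_concat)
            obtain ⟨hle, hdrop⟩ := drop_head_nzIdx pad (ys ++ [y]) 0 i rest h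
            have h1 : PySem.List.slice (ys ++ [y]) none (some ((i :: rest).getLast (by simp) + 1)) =
                ys ++ [y] := by
              rw [hlast]
              have : (ys.length : Int) + 1 = ((ys.length + 1 : Nat) : Int) := by push_cast; ring
              rw [this, PySem.List.slice_to_natCast]
              exact List.take_of_length_le (by simp)
            show PySem.List.slice
                (PySem.List.slice (ys ++ [y]) none (some ((i :: rest).getLast (by simp) + 1)))
                (some i) none = (ys ++ [y]).dropWhile pad
            rw [h1, PySem.List.slice_from _ (by omega : (0:Int) ≤ i)]
            simpa using hdrop

-- ===== VERDICT (by name: the statement is the Claim_ definition above) =====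
theorem remove_zero_padding_by_rows_spec : Claim_equal_remove_zero_padding_by_rows := by
  intro cells _ hpre
  unfold Spec_remove_zero_padding_by_rows
  cases cells with
  | nil => exact absurd rfl hpre
  | cons r0 rs =>
      unfold remove_zero_padding_by_rows remove_zero_padding_by_rows_alt
      have hget : PySem.List.pyGet? (r0 :: rs) 0 = some r0 := by
        simp [PySem.List.pyGet?, PySem.List.pyIdx?]
      rw [hget]
      simp only
      set pad : List Int → Bool := fun row =>
        if r0.length = 0 then row.isEmpty else row.all (· == 0) with hpad
      have hkeep : (fun p : Int × List Int =>
          (if r0.length = 0 then !p.2.isEmpty else p.2.any (· != 0))) =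
          (fun p : Int × List Int => !pad p.2) := by
        funext p
        by_cases h : r0.length = 0 <;> simp [hpad, h, any_ne_eq_not_all]
      rw [hkeep]
      exact (core_eq pad (r0 :: rs)).symm
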